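-- pv_equiv track=rewrite | github.com/peopleinfo/pocketpaw | src/pocketpaw/ai_ui/gpu.py | _resolve_torch_index_url
-- ===== SOURCE A (Python) =====
-- _CUDA_INDEX_MAP: dict[str, str] = {
--     "11.8": "https://download.pytorch.org/whl/cu118",
--     "12.1": "https://download.pytorch.org/whl/cu121",
--     "12.4": "https://download.pytorch.org/whl/cu124",
--     "12.8": "https://download.pytorch.org/whl/cu128",
-- }
--
-- def _ver_tuple(version: str) -> tuple[int, ...]:
--     """Parse ``"12.8"`` → ``(12, 8)``."""
--     try:
--         return tuple(int(x) for x in version.split(".")[:2])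
--     except (ValueError, AttributeError):
--         return (0, 0)
--
-- def _resolve_torch_index_url(cuda_version: str) -> str:
--     """Return the nearest supported PyTorch wheel index for *cuda_version*.
--
--     Picks the highest key in ``_CUDA_INDEX_MAP`` that is ≤ *cuda_version*.
--     E.g. ``"13.1"`` → ``cu128``, ``"12.0"`` → ``cu118``.
--     """
--     if not cuda_version:
--         return ""
--     detected = _ver_tuple(cuda_version)
--     best_key = ""
--     best_ver: tuple[int, ...] = (0, 0)
--     for key in _CUDA_INDEX_MAP:
--         kver = _ver_tuple(key)
--         if kver <= detected and kver >= best_ver: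
--             best_ver = kver
--             best_key = key
--     return _CUDA_INDEX_MAP.get(best_key, "")
-- ===== SOURCE B (Python) =====
-- _CUDA_INDEX_MAP: dict[str, str] = {
--     "11.8": "https://download.pytorch.org/whl/cu118",
--     "12.1": "https://download.pytorch.org/whl/cu121",
--     "12.4": "https://download.pytorch.org/whl/cu124",
--     "12.8": "https://download.pytorch.org/whl/cu128",
-- }
--
-- def _ver_tuple(version: str) -> tuple[int, ...]:
--     try:
--         return tuple(int(x) for x in version.split(".")[:2])
--     except (ValueError, AttributeError):
--         return (0, 0)
--
-- def _resolve_torch_index_url(cuda_version: str) -> str: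
--     # The supported versions form a chain, so the lookup is just a descending
--     # threshold cascade: return at the first supported version <= detected.
--     if not cuda_version:
--         return ""
--     d = _ver_tuple(cuda_version)
--     if d >= (12, 8):
--         return "https://download.pytorch.org/whl/cu128"
--     if d >= (12, 4):
--         return "https://download.pytorch.org/whl/cu124"
--     if d >= (12, 1):
--         return "https://download.pytorch.org/whl/cu121"
--     if d >= (11, 8):
--         return "https://download.pytorch.org/whl/cu118"
--     return ""
-- ===== Notes on version B (the rewrite author's own statement) =====
-- stated objective: simpler
-- what changed: Replaces A's loop over the dict with a running (best_ver, best_key) maximum plus a final dict lookup by a direct descending threshold cascade (four early-return comparisons, no loop, no dict scan), correct because the supported versions form a chain.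
import Mathlib
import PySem

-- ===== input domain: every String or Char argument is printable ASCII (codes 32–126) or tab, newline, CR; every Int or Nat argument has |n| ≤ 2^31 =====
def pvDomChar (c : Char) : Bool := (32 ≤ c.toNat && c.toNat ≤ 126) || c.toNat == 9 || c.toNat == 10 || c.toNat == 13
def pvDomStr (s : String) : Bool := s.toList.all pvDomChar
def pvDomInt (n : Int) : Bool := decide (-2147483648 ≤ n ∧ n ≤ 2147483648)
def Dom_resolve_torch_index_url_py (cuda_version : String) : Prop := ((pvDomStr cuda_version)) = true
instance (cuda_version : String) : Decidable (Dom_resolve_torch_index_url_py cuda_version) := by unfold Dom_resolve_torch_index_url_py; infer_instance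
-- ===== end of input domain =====

-- B replaces A's running-best scan of the dict by a descending threshold cascade of early returns (simpler; same result since the supported versions form a chain).


-- shared module context: _CUDA_INDEX_MAP and the helper _ver_tuple, plus Python's
-- built-in tuple comparison (<= and >=) on int tuples, modelled on List Int (exact:
-- Python compares int tuples lexicographically, a proper prefix is smaller).
def cudaIndexMap : PySem.Dict String String := PySem.Dict.ofList
  [("11.8", "https://download.pytorch.org/whl/cu118"),
   ("12.1", "https://download.pytorch.org/whl/cu121"),
   ("12.4", "https://download.pytorch.org/whl/cu124"),
   ("12.8", "https://download.pytorch.org/whl/cu128")]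

def pyLeT : List Int → List Int → Bool
  | [], _ => true
  | _ :: _, [] => false
  | a :: as, b :: bs => decide (a < b) || (a == b && pyLeT as bs)

def pyGeT : List Int → List Int → Bool
  | _, [] => true
  | [], _ :: _ => false
  | a :: as, b :: bs => decide (b < a) || (a == b && pyGeT as bs)

-- _ver_tuple: int() each of the first two '.'-separated pieces; any ValueError → (0, 0)
def verTuple (version : String) : List Int :=
  -- split? returns none only for sep = ""; the separator here is the literal "."
  match (((PySem.Str.split? version ".").getD []).take 2).mapM PySem.Int.ofStr? with
  | some l => l
  | none => [0, 0]

-- ===== PORT A =====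
def resolve_torch_index_url_py (cuda_version : String) : String :=
  if cuda_version == "" then ""
  else
    let detected := verTuple cuda_version
    let st := cudaIndexMap.keys.foldl
      (fun (st : List Int × String) key =>
        let kver := verTuple key
        if pyLeT kver detected && pyLeT st.1 kver then (kver, key) else st)
      ([0, 0], "")
    cudaIndexMap.getD st.2 ""

-- ===== PORT B =====
def resolve_torch_index_url_py_alt (cuda_version : String) : String :=
  if cuda_version == "" then ""
  else
    let d := verTuple cuda_version
    if pyGeT d [12, 8] then "https://download.pytorch.org/whl/cu128"
    else if pyGeT d [12, 4] then "https://download.pytorch.org/whl/cu124"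
    else if pyGeT d [12, 1] then "https://download.pytorch.org/whl/cu121"
    else if pyGeT d [11, 8] then "https://download.pytorch.org/whl/cu118"
    else ""

-- ===== PRECONDITION & SPEC =====
def Spec_resolve_torch_index_url_py (cuda_version : String) (out : String) : Prop := out = resolve_torch_index_url_py_alt cuda_version
instance (cuda_version : String) (out : String) : Decidable (Spec_resolve_torch_index_url_py cuda_version out) := by unfold Spec_resolve_torch_index_url_py; infer_instance

-- ===== CLAIM (what is proved, stated in full; the proofs are below) =====
def Claim_equal_resolve_torch_index_url_py : Prop := ∀ (cuda_version : String), Dom_resolve_torch_index_url_py cuda_version → Spec_resolve_torch_index_url_py cuda_version (resolve_torch_index_url_py cuda_version)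

-- ===== LEMMAS AND PROOFS =====

lemma geT_eq_leT (a b : List Int) : pyGeT a b = pyLeT b a := by
  induction a generalizing b with
  | nil => cases b <;> simp [pyGeT, pyLeT]
  | cons x xs ih =>
    cases b with
    | nil => simp [pyGeT, pyLeT]
    | cons y ys =>
      simp only [pyGeT, pyLeT, ih]
      by_cases h : x = y
      · subst h; rfl
      · have h1 : (x == y) = false := by simp [h]
        have h2 : (y == x) = false := by simp [Ne.symm h]
        rw [h1, h2]

-- the map's version tuples form a ≤-chain against any detected tuple
lemma chain_128 (d : List Int) (h : pyLeT [12, 8] d = true) : pyLeT [12, 4] d = true := by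
  rcases d with _ | ⟨a, _ | ⟨b, t⟩⟩ <;> simp [pyLeT] at h ⊢ <;> omega

lemma chain_124 (d : List Int) (h : pyLeT [12, 4] d = true) : pyLeT [12, 1] d = true := by
  rcases d with _ | ⟨a, _ | ⟨b, t⟩⟩ <;> simp [pyLeT] at h ⊢ <;> omega

lemma chain_121 (d : List Int) (h : pyLeT [12, 1] d = true) : pyLeT [11, 8] d = true := by
  rcases d with _ | ⟨a, _ | ⟨b, t⟩⟩ <;> simp [pyLeT] at h ⊢ <;> omega

lemma keysMap : cudaIndexMap.keys = ["11.8", "12.1", "12.4", "12.8"] := by decide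
lemma gdE : cudaIndexMap.getD "" "" = "" := by decide
lemma gd118 : cudaIndexMap.getD "11.8" "" = "https://download.pytorch.org/whl/cu118" := by decide
lemma gd121 : cudaIndexMap.getD "12.1" "" = "https://download.pytorch.org/whl/cu121" := by decide
lemma gd124 : cudaIndexMap.getD "12.4" "" = "https://download.pytorch.org/whl/cu124" := by decide
lemma gd128 : cudaIndexMap.getD "12.8" "" = "https://download.pytorch.org/whl/cu128" := by decide

lemma vt118 : verTuple "11.8" = [11, 8] := by decide
lemma vt121 : verTuple "12.1" = [12, 1] := by decide
lemma vt124 : verTuple "12.4" = [12, 4] := by decide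
lemma vt128 : verTuple "12.8" = [12, 8] := by decide

lemma core_eq (d : List Int) :
    (cudaIndexMap.getD
      (cudaIndexMap.keys.foldl
        (fun (st : List Int × String) key =>
          let kver := verTuple key
          if pyLeT kver d && pyLeT st.1 kver then (kver, key) else st)
        ([0, 0], "")).2 "")
    = (if pyGeT d [12, 8] then "https://download.pytorch.org/whl/cu128"
       else if pyGeT d [12, 4] then "https://download.pytorch.org/whl/cu124"
       else if pyGeT d [12, 1] then "https://download.pytorch.org/whl/cu121"
       else if pyGeT d [11, 8] then "https://download.pytorch.org/whl/cu118"
       else "") := by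
  rw [geT_eq_leT, geT_eq_leT, geT_eq_leT, geT_eq_leT]
  by_cases h8 : pyLeT [12, 8] d = true
  · have h4 := chain_128 d h8
    have h1 := chain_124 d h4
    have h0 := chain_121 d h1
    simp [keysMap, gd128, pyLeT, List.foldl,
      h8, h4, h1, h0, vt118, vt121, vt124, vt128]
  · by_cases h4 : pyLeT [12, 4] d = true
    · have h1 := chain_124 d h4
      have h0 := chain_121 d h1
      simp [keysMap, gd124, pyLeT, List.foldl,
        h8, h4, h1, h0, vt118, vt121, vt124, vt128]
    · by_cases h1 : pyLeT [12, 1] d = true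
      · have h0 := chain_121 d h1
        simp [keysMap, gd121, pyLeT, List.foldl,
          h8, h4, h1, h0, vt118, vt121, vt124, vt128]
      · by_cases h0 : pyLeT [11, 8] d = true
        · simp [keysMap, gd118, pyLeT, List.foldl,
            h8, h4, h1, h0, vt118, vt121, vt124, vt128]
        · simp [keysMap, gdE, pyLeT, List.foldl,
            h8, h4, h1, h0, vt118, vt121, vt124, vt128]

-- ===== VERDICT (by name: the statement is the Claim_ definition above) =====
theorem resolve_torch_index_url_py_spec : Claim_equal_resolve_torch_index_url_py := by
  intro s _
  unfold Spec_resolve_torch_index_url_py resolve_torch_index_url_py resolve_torch_index_url_py_alt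
  by_cases hs : s == ""
  · simp [hs]
  · simp only [hs]
    exact core_eq (verTuple s)
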